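-- pv_equiv track=rewrite | github.com/Rogan003/Python-vezbe | security.py | pronalazak
-- ===== SOURCE A (Python) =====
-- def pronalazak(nesto):
--     string=""
--     mesto=0
--     for i in nesto:
--         if i=='G':
--             if mesto==1:
--                 string+="quiet"
--             else:
--                 string+="ALARM"
--         elif i=='T':
--             mesto+=1
--         elif i=='$':
--             mesto+=1
--     return string
-- ===== SOURCE B (Python) =====
-- def pronalazak(nesto):
--     # two-pass: inclusive prefix counts of 'T'/'$', then emit at each 'G' and join
--     counts = []
--     c = 0
--     for ch in nesto:
--         c += ch in ('T', '$')
--         counts.append(c)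
--     return "".join("quiet" if k == 1 else "ALARM"
--                    for ch, k in zip(nesto, counts) if ch == 'G')
-- ===== Notes on version B (the rewrite author's own statement) =====
-- stated objective: alternative
-- what changed: Replaces the single stateful loop (mutable counter + string concatenation with branching) by a two-pass decomposition: first an inclusive prefix-count table of 'T'/'$', then a zip/filter pass that emits one word per 'G' and joins them.
import Mathlib
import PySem

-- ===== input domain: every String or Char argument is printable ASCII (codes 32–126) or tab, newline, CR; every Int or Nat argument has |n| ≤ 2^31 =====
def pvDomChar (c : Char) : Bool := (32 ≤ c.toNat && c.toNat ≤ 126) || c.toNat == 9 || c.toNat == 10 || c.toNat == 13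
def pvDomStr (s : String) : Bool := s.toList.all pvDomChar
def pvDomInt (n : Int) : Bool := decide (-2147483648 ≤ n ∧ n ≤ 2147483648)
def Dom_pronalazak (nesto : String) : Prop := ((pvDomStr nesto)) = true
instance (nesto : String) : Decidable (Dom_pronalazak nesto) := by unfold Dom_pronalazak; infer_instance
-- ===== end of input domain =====

-- B replaces A's single stateful loop by a two-pass decomposition (prefix-count table, then zip/filter/join); same cost, different structure.


-- ===== PORT A =====
-- one loop over the characters, carrying (string, mesto)
def pvStepA (st : String × Int) (i : Char) : String × Int :=
  if i = 'G' then
    (if st.2 = 1 then st.1 ++ "quiet" else st.1 ++ "ALARM", st.2)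
  else if i = 'T' then (st.1, st.2 + 1)
  else if i = '$' then (st.1, st.2 + 1)
  else st

def pronalazak (nesto : String) : String :=
  (nesto.toList.foldl pvStepA ("", 0)).1

-- ===== PORT B =====
-- inclusive prefix counts of 'T'/'$' (the loop building `counts` in Source B)
def pvCounts : List Char → Int → List Int
  | [], _ => []
  | c :: cs, acc =>
      let acc' := acc + (if c = 'T' ∨ c = '$' then 1 else 0)
      acc' :: pvCounts cs acc'

-- the word emitted for a (char, count) pair when the char is 'G'
def pvEmit (p : Char × Int) : Option String :=
  if p.1 = 'G' then some (if p.2 = 1 then "quiet" else "ALARM") else none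

def pronalazak_alt (nesto : String) : String :=
  String.join ((nesto.toList.zip (pvCounts nesto.toList 0)).filterMap pvEmit)

-- ===== PRECONDITION & SPEC =====
def Spec_pronalazak (nesto : String) (out : String) : Prop := out = pronalazak_alt nesto
instance (nesto : String) (out : String) : Decidable (Spec_pronalazak nesto out) := by unfold Spec_pronalazak; infer_instance

-- ===== CLAIM (what is proved, stated in full; the proofs are below) =====
def Claim_equal_pronalazak : Prop := ∀ (nesto : String), Dom_pronalazak nesto → Spec_pronalazak nesto (pronalazak nesto)

-- ===== LEMMAS AND PROOFS =====
theorem pv_join_cons (a : String) (l : List String) :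
    String.join (a :: l) = a ++ String.join l := by
  have h : ∀ (l : List String) (s t : String),
      l.foldl (· ++ ·) (s ++ t) = s ++ l.foldl (· ++ ·) t := by
    intro l
    induction l with
    | nil => intro s t; rfl
    | cons x xs ih => intro s t; simp only [List.foldl, String.append_assoc, ih]
  simp only [String.join, List.foldl]
  have := h l a ""
  simpa using this

theorem pv_loopA (cs : List Char) (s : String) (m : Int) :
    (cs.foldl pvStepA (s, m)).1 =
      s ++ String.join ((cs.zip (pvCounts cs m)).filterMap pvEmit) := by
  induction cs generalizing s m with
  | nil => simp [String.join]
  | cons c cs ih =>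
    by_cases hG : c = 'G'
    · subst hG
      simp only [List.foldl, pvStepA, pvCounts]
      norm_num
      rw [ih]
      by_cases hm : m = 1 <;>
        simp [hm, pvEmit, pv_join_cons, String.append_assoc]
    · by_cases hT : c = 'T'
      · subst hT
        simp only [List.foldl, pvStepA, pvCounts]
        norm_num
        rw [ih]
        simp [pvEmit]
      · by_cases hD : c = '$'
        · subst hD
          simp only [List.foldl, pvStepA, pvCounts]
          norm_num
          rw [ih]
          simp [pvEmit]
        · simp only [List.foldl, pvStepA, pvCounts, if_neg hG, if_neg hT, if_neg hD]
          norm_num [hT, hD]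
          rw [ih]
          simp [pvEmit, hG]

-- ===== VERDICT (by name: the statement is the Claim_ definition above) =====
theorem pronalazak_spec : Claim_equal_pronalazak := by
  intro nesto _
  unfold Spec_pronalazak pronalazak pronalazak_alt
  simpa using pv_loopA nesto.toList "" 0
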